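-- pv_equiv track=rewrite | github.com/pypi-data/pypi-mirror-365 | packages/flexfloat/flexfloat-0.3.1.tar.gz/flexfloat-0.3.1/flexfloat/core.py | _grow_exponent
-- ===== SOURCE A (Python) =====
-- def _grow_exponent(exponent: int, exponent_length: int) -> int:
--     """Grows the exponent if it exceeds the maximum value for the current length.
--
--     Args:
--         exponent (int): The current exponent value.
--         exponent_length (int): The current length of the exponent in bits.
--
--     Returns:
--         int: The new exponent length if it needs to be grown, otherwise the same
--             length.
--     """
--     while True:
--         half = 1 << (exponent_length - 1)
--         min_exponent = -half
--         max_exponent = half - 1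
--
--         if min_exponent <= exponent <= max_exponent:
--             break
--         exponent_length += 1
--
--     return exponent_length
-- ===== SOURCE B (Python) =====
-- def _grow_exponent(exponent: int, exponent_length: int) -> int:
--     """Closed-form: the minimal signed bit-length that fits `exponent`,
--     but never shrinking below the current length."""
--     if exponent >= 0:
--         required = exponent.bit_length() + 1
--     else:
--         required = (-exponent - 1).bit_length() + 1
--     return max(exponent_length, required)
-- ===== Notes on version B (the rewrite author's own statement) =====
-- stated objective: simpler
-- what changed: Replaces the grow-by-one loop with a closed-form minimal signed bit-length (bit_length-based) combined with max against the current length.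
import Mathlib
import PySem

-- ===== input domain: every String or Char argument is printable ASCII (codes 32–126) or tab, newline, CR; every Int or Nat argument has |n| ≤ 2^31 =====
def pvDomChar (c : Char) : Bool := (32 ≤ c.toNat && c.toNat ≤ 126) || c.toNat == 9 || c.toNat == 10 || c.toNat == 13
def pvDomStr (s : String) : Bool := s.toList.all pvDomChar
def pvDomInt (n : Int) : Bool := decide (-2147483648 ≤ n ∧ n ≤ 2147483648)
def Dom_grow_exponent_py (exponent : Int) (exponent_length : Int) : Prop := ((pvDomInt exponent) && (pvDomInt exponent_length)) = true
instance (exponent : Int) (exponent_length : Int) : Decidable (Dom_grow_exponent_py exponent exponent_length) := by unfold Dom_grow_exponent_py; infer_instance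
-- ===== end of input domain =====

-- B replaces A's grow-by-one loop with a closed-form minimal signed bit-length (simpler);
-- equivalence is proved for exponent_length ≥ 1 (A raises ValueError on exponent_length ≤ 0, where B returns a value).


-- ===== PORT A =====
-- A's `while True` loop; fuel only makes the recursion total (64 iterations suffice on Dom ∧ Pre_,
-- proved in the lemmas below; the fuel-0 branch is never reached there).
def growLoopA (fuel : Nat) (exponent : Int) (exponent_length : Int) : Int :=
  match fuel with
  | 0 => exponent_length
  | fuel + 1 =>
    let half : Int := 2 ^ (exponent_length - 1).toNat   -- 1 << (exponent_length - 1)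
    let min_exponent := -half
    let max_exponent := half - 1
    if min_exponent ≤ exponent ∧ exponent ≤ max_exponent then exponent_length
    else growLoopA fuel exponent (exponent_length + 1)

def grow_exponent_py (exponent : Int) (exponent_length : Int) : Int :=
  if exponent_length ≤ 0 then 0   -- Python raises ValueError here (negative shift); excluded by Pre_
  else growLoopA 64 exponent exponent_length

-- ===== PORT B =====
def grow_exponent_py_alt (exponent : Int) (exponent_length : Int) : Int :=
  let required : Int :=
    if 0 ≤ exponent then (Nat.size exponent.toNat : Int) + 1   -- exponent.bit_length() + 1
    else (Nat.size (-exponent - 1).toNat : Int) + 1            -- (-exponent - 1).bit_length() + 1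
  max exponent_length required

-- ===== PRECONDITION & SPEC =====
-- Pre_ excludes exactly exponent_length ≤ 0, where A raises ValueError (negative shift count).
def Pre_grow_exponent_py (exponent : Int) (exponent_length : Int) : Prop := 1 ≤ exponent_length
instance (exponent : Int) (exponent_length : Int) : Decidable (Pre_grow_exponent_py exponent exponent_length) := by unfold Pre_grow_exponent_py; infer_instance
def pvWitness_grow_exponent_py : Int × Int := (5, 2)

def Spec_grow_exponent_py (exponent : Int) (exponent_length : Int) (out : Int) : Prop := out = grow_exponent_py_alt exponent exponent_length
instance (exponent : Int) (exponent_length : Int) (out : Int) : Decidable (Spec_grow_exponent_py exponent exponent_length out) := by unfold Spec_grow_exponent_py; infer_instance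

-- ===== CLAIM (what is proved, stated in full; the proofs are below) =====
def Claim_equal_grow_exponent_py : Prop := ∀ (exponent : Int) (exponent_length : Int), Dom_grow_exponent_py exponent exponent_length → Pre_grow_exponent_py exponent exponent_length → Spec_grow_exponent_py exponent exponent_length (grow_exponent_py exponent exponent_length)

-- ===== LEMMAS AND PROOFS =====

-- B's "required" value, as a proof-side abbreviation.
def pvReq (exponent : Int) : Int :=
  if 0 ≤ exponent then (Nat.size exponent.toNat : Int) + 1
  else (Nat.size (-exponent - 1).toNat : Int) + 1

theorem alt_eq_max (exponent exponent_length : Int) :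
    grow_exponent_py_alt exponent exponent_length = max exponent_length (pvReq exponent) := rfl

-- "fits in a signed field of width L" ↔ "pvReq ≤ L", for L ≥ 1.
theorem fits_iff (exponent L : Int) (hL : 1 ≤ L) :
    (-(2 ^ (L - 1).toNat : Int) ≤ exponent ∧ exponent ≤ (2 ^ (L - 1).toNat : Int) - 1)
      ↔ pvReq exponent ≤ L := by
  have hk : ((L - 1).toNat : Int) = L - 1 := Int.toNat_of_nonneg (by omega)
  set k := (L - 1).toNat with hkdef
  unfold pvReq
  split_ifs with he
  · -- 0 ≤ exponent
    have h1 : exponent ≤ (2 ^ k : Int) - 1 ↔ exponent.toNat < 2 ^ k := by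
      have := Int.toNat_of_nonneg he
      constructor
      · intro h
        have : (exponent.toNat : Int) < ((2 ^ k : Nat) : Int) := by push_cast; omega
        exact_mod_cast this
      · intro h
        have : (exponent.toNat : Int) < ((2 ^ k : Nat) : Int) := by exact_mod_cast h
        push_cast at this; omega
    have h2 : exponent.toNat < 2 ^ k ↔ Nat.size exponent.toNat ≤ k := Nat.size_le.symm
    constructor
    · rintro ⟨_, hu⟩
      have := h2.mp (h1.mp hu)
      omega
    · intro h
      refine ⟨by omega, h1.mpr (h2.mpr ?_)⟩
      omega
  · -- exponent < 0
    have hm : (0 : Int) ≤ -exponent - 1 := by omega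
    have h1 : -(2 ^ k : Int) ≤ exponent ↔ (-exponent - 1).toNat < 2 ^ k := by
      have := Int.toNat_of_nonneg hm
      constructor
      · intro h
        have : ((-exponent - 1).toNat : Int) < ((2 ^ k : Nat) : Int) := by push_cast; omega
        exact_mod_cast this
      · intro h
        have : ((-exponent - 1).toNat : Int) < ((2 ^ k : Nat) : Int) := by exact_mod_cast h
        push_cast at this; omega
    have h2 : (-exponent - 1).toNat < 2 ^ k ↔ Nat.size (-exponent - 1).toNat ≤ k :=
      Nat.size_le.symm
    constructor
    · rintro ⟨hl, _⟩
      have := h2.mp (h1.mp hl)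
      omega
    · intro h
      refine ⟨h1.mpr (h2.mpr (by omega)), by omega⟩

theorem loopA_eq (fuel : Nat) (exponent L : Int) (hL : 1 ≤ L)
    (hf : pvReq exponent ≤ L + fuel) :
    growLoopA fuel exponent L = max L (pvReq exponent) := by
  induction fuel generalizing L with
  | zero =>
    simp only [growLoopA]
    omega
  | succ n ih =>
    simp only [growLoopA]
    split_ifs with h
    · have := (fits_iff exponent L hL).mp h
      omega
    · have hnot := (fits_iff exponent L hL)
      have hlt : L < pvReq exponent := by
        by_contra hc
        exact h (hnot.mpr (by omega))
      have := ih (L + 1) (by omega) (by omega)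
      omega

theorem req_bound (exponent : Int) (h : -2147483648 ≤ exponent ∧ exponent ≤ 2147483648) :
    pvReq exponent ≤ 33 := by
  unfold pvReq
  split_ifs with he
  · have h1 : exponent.toNat < 2 ^ 32 := by
      have := Int.toNat_of_nonneg he
      omega
    have := Nat.size_le.mpr h1
    omega
  · have h1 : (-exponent - 1).toNat < 2 ^ 32 := by
      have := Int.toNat_of_nonneg (show (0:Int) ≤ -exponent - 1 by omega)
      omega
    have := Nat.size_le.mpr h1
    omega

-- ===== VERDICT (by name: the statement is the Claim_ definition above) =====
theorem grow_exponent_py_spec : Claim_equal_grow_exponent_py := by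
  intro exponent L hdom hpre
  unfold Spec_grow_exponent_py
  have hb : -2147483648 ≤ exponent ∧ exponent ≤ 2147483648 := by
    simp [Dom_grow_exponent_py, pvDomInt] at hdom
    exact hdom.1
  have hL : 1 ≤ L := hpre
  rw [grow_exponent_py, if_neg (by omega), alt_eq_max,
    loopA_eq 64 exponent L hL (by have := req_bound exponent hb; omega)]
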